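-- pv_equiv track=rewrite | github.com/dongsub-joung/zero-base | 0805/N4.py | solution
-- ===== SOURCE A (Python) =====
-- def solution(A: list, K: int)->int:
--     cnt= 0
--     A.sort()
--     for e in A:
--         K-=e
--         if K<0:
--             break
--         cnt+=1
--     return cnt
-- ===== SOURCE B (Python) =====
-- def solution(A: list, K: int) -> int:
--     A.sort()
--     if not A or A[0] > K:
--         return 0
--     # prefix sums of the sorted list
--     P = []
--     s = 0
--     for e in A:
--         s += e
--         P.append(s)
--     # Because A is sorted, its prefix sums form a convex sequence, so the set of
--     # prefixes with sum <= K (given the first one fits) is exactly 1..m for the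
--     # LAST m with P[m-1] <= K: find it by walking back from the full list.
--     m = len(A)
--     while P[m - 1] > K:
--         m -= 1
--     return m
-- ===== Notes on version B (the rewrite author's own statement) =====
-- stated objective: alternative
-- what changed: Instead of decrementing the budget while scanning forward, B builds the prefix-sum array of the sorted list and, after a head guard, walks BACKWARD from the full length to the last prefix whose sum fits K, relying on convexity of prefix sums of a sorted list.
import Mathlib
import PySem

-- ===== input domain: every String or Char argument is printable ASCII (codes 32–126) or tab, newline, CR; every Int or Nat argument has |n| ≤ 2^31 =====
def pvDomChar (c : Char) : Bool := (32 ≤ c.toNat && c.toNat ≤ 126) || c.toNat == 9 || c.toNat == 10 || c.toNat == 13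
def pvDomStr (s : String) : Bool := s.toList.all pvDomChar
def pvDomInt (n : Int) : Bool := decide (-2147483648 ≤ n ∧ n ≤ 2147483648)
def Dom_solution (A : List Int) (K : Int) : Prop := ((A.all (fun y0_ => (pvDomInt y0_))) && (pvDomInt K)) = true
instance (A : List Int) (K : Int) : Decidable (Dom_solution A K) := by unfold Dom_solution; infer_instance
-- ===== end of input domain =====

-- B replaces A's forward budget-decrementing scan by a backward walk over the prefix-sum
-- array of the sorted list (correct by convexity of those prefix sums); alternative, same
-- cost. Both sort the argument in place in Python; the equivalence proved is about the
-- return value.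

-- ===== PORT A =====
-- the for-loop with break: counts elements while the remaining budget K stays ≥ 0
def solutionLoop : List Int → Int → Int → Int
  | [], _, cnt => cnt
  | e :: t, K, cnt => if K - e < 0 then cnt else solutionLoop t (K - e) (cnt + 1)

def solution (A : List Int) (K : Int) : Int :=
  solutionLoop (PySem.List.sorted A (fun x => x) false) K 0

-- ===== PORT B =====
-- the P-building loop of Source B: running sums starting from s
def prefixSums (s : Int) : List Int → List Int
  | [] => []
  | e :: t => (s + e) :: prefixSums (s + e) t

-- the 'while P[m-1] > K: m -= 1' loop of Source B, recursing on m
-- (indices stay in range under the guard P[0] ≤ K, so getD's default is never used)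
def backScan (P : List Int) (K : Int) : Nat → Int
  | 0 => 0
  | m + 1 => if K < P.getD m 0 then backScan P K m else ((m : Int) + 1)

def solution_alt (A : List Int) (K : Int) : Int :=
  match PySem.List.sorted A (fun x => x) false with
  | [] => 0
  | e :: t =>
      if K < e then 0
      else backScan (prefixSums 0 (e :: t)) K (e :: t).length

-- ===== PRECONDITION & SPEC =====
def Spec_solution (A : List Int) (K : Int) (out : Int) : Prop := out = solution_alt A K
instance (A : List Int) (K : Int) (out : Int) : Decidable (Spec_solution A K out) := by unfold Spec_solution; infer_instance

-- ===== CLAIM (what is proved, stated in full; the proofs are below) =====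
def Claim_equal_solution : Prop := ∀ (A : List Int) (K : Int), Dom_solution A K → Spec_solution A K (solution A K)

-- ===== LEMMAS AND PROOFS =====

theorem length_prefixSums (s : Int) (l : List Int) : (prefixSums s l).length = l.length := by
  induction l generalizing s with
  | nil => rfl
  | cons e t ih => simp [prefixSums, ih]

-- A's loop counts the longest prefix of running sums staying ≤ K
theorem loop_eq_takeWhile (l : List Int) (K s cnt : Int) :
    solutionLoop l (K - s) cnt =
      cnt + ((prefixSums s l).takeWhile (fun x => decide (x ≤ K))).length := by
  induction l generalizing s cnt with
  | nil => simp [solutionLoop, prefixSums]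
  | cons e t ih =>
    simp only [solutionLoop, prefixSums, List.takeWhile]
    by_cases h : s + e ≤ K
    · have h1 : ¬ (K - s - e < 0) := by omega
      have h2 : K - s - e = K - (s + e) := by ring
      have h3 : ¬ K < s + e := by omega
      simp [h, h2, ih (s + e) (cnt + 1), h3]
      ring
    · have h1 : K - s - e < 0 := by omega
      simp [h, h1]

-- running sums over positive elements from a base already above K stay above K
theorem prefixSums_gt_of_pos (t : List Int) (K b : Int)
    (hpos : ∀ x ∈ t, 0 < x) (hb : K < b) :
    ∀ y ∈ prefixSums b t, K < y := by
  induction t generalizing b with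
  | nil => simp [prefixSums]
  | cons e t ih =>
    intro y hy
    simp only [prefixSums, List.mem_cons] at hy
    have he : 0 < e := hpos e (by simp)
    rcases hy with rfl | hy
    · omega
    · exact ih (b + e) (fun x hx => hpos x (by simp [hx])) (by omega) y hy

-- convexity: once a running sum of a sorted list exceeds K (starting from s ≤ K),
-- every later running sum exceeds K
theorem dropWhile_gt (l : List Int) (K s : Int)
    (hsort : l.Pairwise (· ≤ ·)) (hs : s ≤ K) :
    ∀ y ∈ (prefixSums s l).dropWhile (fun x => decide (x ≤ K)), K < y := by
  induction l generalizing s with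
  | nil => simp [prefixSums]
  | cons e t ih =>
    rcases List.pairwise_cons.mp hsort with ⟨hhead, htail⟩
    by_cases h : s + e ≤ K
    · intro y hy
      simp only [prefixSums, List.dropWhile] at hy
      rw [show (decide (s + e ≤ K)) = true by simp [h]] at hy
      exact ih (s + e) htail h y hy
    · intro y hy
      simp only [prefixSums, List.dropWhile] at hy
      rw [show (decide (s + e ≤ K)) = false by simp [h]] at hy
      simp only [List.mem_cons] at hy
      have he : 0 < e := by omega
      rcases hy with rfl | hy
      · omega
      · exact prefixSums_gt_of_pos t K (s + e)
          (fun x hx => lt_of_lt_of_le he (hhead x hx)) (by omega) y hy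

-- the backward walk returns t, the takeWhile length, as soon as t ≤ m
theorem backScan_eq (P : List Int) (K : Int) (t : Nat)
    (h1 : ∀ i, i < t → P.getD i 0 ≤ K)
    (h2 : ∀ i, t ≤ i → i < P.length → K < P.getD i 0)
    (ht : 1 ≤ t) :
    ∀ m, t ≤ m → m ≤ P.length → backScan P K m = (t : Int) := by
  intro m
  induction m with
  | zero => intro h _; omega
  | succ m ih =>
    intro hm hlen
    by_cases hc : t ≤ m
    · have : K < P.getD m 0 := h2 m hc (by omega)
      simp only [backScan, if_pos this]
      exact ih hc (by omega)
    · have htm : t = m + 1 := by omega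
      have hng : ¬ K < P.getD m 0 := not_lt.mpr (h1 m (by omega))
      rw [show backScan P K (m + 1)
            = if K < P.getD m 0 then backScan P K m else ((m : Int) + 1) from rfl,
         if_neg hng]
      omega

-- ===== VERDICT (by name: the statement is the Claim_ definition above) =====
theorem solution_spec : Claim_equal_solution := by
  intro A K _
  unfold Spec_solution solution solution_alt
  have hpw : (PySem.List.sorted A (fun x => x) false).Pairwise (· ≤ ·) := by
    simpa using PySem.List.sorted_pairwise A (fun x => x)
  cases hL : PySem.List.sorted A (fun x => x) false with
  | nil => simp [solutionLoop]
  | cons e t =>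
    rw [hL] at hpw
    by_cases he : K < e
    · have h1 : K - e < 0 := by omega
      simp [solutionLoop, h1, he]
    · show solutionLoop (e :: t) K 0 =
        if K < e then 0 else backScan (prefixSums 0 (e :: t)) K (e :: t).length
      rw [if_neg he]
      -- A's side: loop = takeWhile length over P
      have hA := loop_eq_takeWhile (e :: t) K 0 0
      rw [show K - 0 = K by ring] at hA
      rw [hA]
      have heK : e ≤ K := not_lt.mp he
      set P := prefixSums 0 (e :: t) with hP
      set T := P.takeWhile (fun x => decide (x ≤ K)) with hT
      have hsplit : T ++ P.dropWhile (fun x => decide (x ≤ K)) = P :=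
        List.takeWhile_append_dropWhile
      have hTlen : T.length ≤ P.length := by
        conv_rhs => rw [← hsplit]
        simp
      have hPlen : P.length = (e :: t).length := length_prefixSums 0 (e :: t)
      have hPe : P = (0 + e) :: prefixSums (0 + e) t := rfl
      -- first running sum is e ≤ K, so T is nonempty
      have hT1 : 1 ≤ T.length := by
        rw [hT, hPe, List.takeWhile_cons]
        simp [heK]
      -- indices below T.length give sums ≤ K
      have h1 : ∀ i, i < T.length → P.getD i 0 ≤ K := by
        intro i hi
        have hgd : P.getD i 0 = T[i]'hi := by
          rw [List.getD_eq_getElem?_getD, ← hsplit, List.getElem?_append_left hi,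
              List.getElem?_eq_getElem hi]
          rfl
        rw [hgd]
        have := List.mem_takeWhile_imp (l := P) (p := fun x => decide (x ≤ K))
          (List.getElem_mem hi)
        simpa using this
      -- indices from T.length on give sums > K (convexity of sorted prefix sums)
      have h2 : ∀ i, T.length ≤ i → i < P.length → K < P.getD i 0 := by
        intro i hit hiP
        have hiD : i - T.length < (P.dropWhile (fun x => decide (x ≤ K))).length := by
          have : T.length + (P.dropWhile (fun x => decide (x ≤ K))).length = P.length := by
            conv_rhs => rw [← hsplit]; simp
          omega
        have hgd : P.getD i 0 = (P.dropWhile (fun x => decide (x ≤ K)))[i - T.length]'hiD := by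
          conv_lhs => rw [List.getD_eq_getElem?_getD, ← hsplit]
          rw [List.getElem?_append_right hit, List.getElem?_eq_getElem hiD]
          rfl
        rw [hgd]
        -- dropWhile P = dropWhile (prefixSums e t) because the head e is ≤ K
        have hPd : P.dropWhile (fun x => decide (x ≤ K)) =
            (prefixSums e t).dropWhile (fun x => decide (x ≤ K)) := by
          rw [hPe, List.dropWhile_cons]
          simp [heK]
        apply dropWhile_gt t K e (List.pairwise_cons.mp hpw).2 heK
        rw [← hPd]
        exact List.getElem_mem hiD
      have := backScan_eq P K T.length h1 h2 hT1 P.length hTlen le_rfl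
      rw [hPlen] at this
      rw [this]
      simp
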